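-- pv_equiv track=rewrite | github.com/career-prep/ucp-namer-latam-2026 | homework1/deepti_patil/q7_KAnagrams.py | are_k_anagrams
-- ===== SOURCE A (Python) =====
-- from collections import Counter
--
-- def are_k_anagrams(s1: str, s2: str, k: int) -> bool:
--     """
--     Return True if s1 and s2 are k-anagrams.
--
--     Time Complexity: O(n)
--         - Counting characters is linear in the string length.
--     Space Complexity: O(1) / O(u)
--         - O(u) for distinct characters (bounded by alphabet size in practice).
--     """
--
--     # Anagrams must be the same length
--     if len(s1) != len(s2):
--         return False
--
--     count1 = Counter(s1)
--     count2 = Counter(s2)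
--
--     # How many characters in s1 are "extra" compared to s2?
--     # Each extra character requires one change in s1.
--     changes_needed = 0
--     for ch, freq in count1.items():
--         if freq > count2.get(ch, 0):
--             changes_needed += freq - count2.get(ch, 0)
--
--     return changes_needed <= k
-- ===== SOURCE B (Python) =====
-- def are_k_anagrams(s1: str, s2: str, k: int) -> bool:
--     # Greedy matching: consume one occurrence from a pool of s2's characters
--     # per character of s1; unmatched characters of s1 are the changes needed.
--     if len(s1) != len(s2):
--         return False
--     pool = list(s2)
--     misses = 0
--     for ch in s1:
--         if ch in pool:
--             pool.remove(ch)
--         else: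
--             misses += 1
--     return misses <= k
-- ===== Notes on version B (the rewrite author's own statement) =====
-- stated objective: alternative
-- what changed: Replaces A's frequency counting (two Counters plus a surplus-comparison loop) by counter-free greedy matching: each character of s1 consumes one occurrence from a mutable pool of s2's characters, and the unmatched characters are counted.
import Mathlib
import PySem

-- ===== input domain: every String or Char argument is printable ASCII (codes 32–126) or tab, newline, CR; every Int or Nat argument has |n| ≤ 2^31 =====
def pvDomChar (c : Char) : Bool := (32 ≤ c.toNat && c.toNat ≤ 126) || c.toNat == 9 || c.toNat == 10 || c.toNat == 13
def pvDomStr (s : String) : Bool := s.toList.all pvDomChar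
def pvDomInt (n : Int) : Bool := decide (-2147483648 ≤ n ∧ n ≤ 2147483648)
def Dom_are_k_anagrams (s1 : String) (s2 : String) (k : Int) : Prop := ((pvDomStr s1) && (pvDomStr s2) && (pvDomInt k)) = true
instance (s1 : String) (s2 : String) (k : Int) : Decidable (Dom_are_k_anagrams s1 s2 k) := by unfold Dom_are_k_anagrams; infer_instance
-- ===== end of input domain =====

-- B replaces A's frequency counting by counter-free greedy matching against a pool of s2's
-- characters; objective: alternative (not faster).

-- ===== PORT A =====
def are_k_anagrams (s1 : String) (s2 : String) (k : Int) : Bool :=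
  if PySem.Str.len s1 ≠ PySem.Str.len s2 then false
  else
    let count1 := PySem.Dict.counter s1.toList
    let count2 := PySem.Dict.counter s2.toList
    let changes_needed := count1.items.foldl (fun acc p =>
      if p.2 > count2.getD p.1 0 then acc + (p.2 - count2.getD p.1 0) else acc) (0 : Int)
    decide (changes_needed ≤ k)

-- ===== PORT B =====
-- 'for ch in s1: if ch in pool: pool.remove(ch) else: misses += 1' as structural recursion;
-- List.erase removes the first occurrence, exactly like Python's list.remove (guarded by 'in').
def pvGoB : List Char → List Char → Int → Int
  | [], _, misses => misses
  | ch :: rest, pool, misses =>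
      if pool.contains ch then pvGoB rest (pool.erase ch) misses
      else pvGoB rest pool (misses + 1)

def are_k_anagrams_alt (s1 : String) (s2 : String) (k : Int) : Bool :=
  if PySem.Str.len s1 ≠ PySem.Str.len s2 then false
  else decide (pvGoB s1.toList s2.toList 0 ≤ k)

-- ===== PRECONDITION & SPEC =====
def Spec_are_k_anagrams (s1 : String) (s2 : String) (k : Int) (out : Bool) : Prop := out = are_k_anagrams_alt s1 s2 k
instance (s1 : String) (s2 : String) (k : Int) (out : Bool) : Decidable (Spec_are_k_anagrams s1 s2 k out) := by unfold Spec_are_k_anagrams; infer_instance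

-- ===== CLAIM (what is proved, stated in full; the proofs are below) =====
def Claim_equal_are_k_anagrams : Prop := ∀ (s1 : String) (s2 : String) (k : Int), Dom_are_k_anagrams s1 s2 k → Spec_are_k_anagrams s1 s2 k (are_k_anagrams s1 s2 k)

-- ===== LEMMAS AND PROOFS =====

-- surplus of v in l1 over l2 ("changes needed because of v")
def pvChv (l1 l2 : List Char) (v : Char) : Int := max ((l1.count v : Int) - (l2.count v : Int)) 0

theorem pvChv_cons_mem (ch : Char) (rest pool : List Char) (h : ch ∈ pool) (v : Char) :
    pvChv (ch :: rest) pool v = pvChv rest (pool.erase ch) v := by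
  unfold pvChv
  by_cases hv : v = ch
  · subst hv
    have h1 : pool.count v ≥ 1 := List.one_le_count_iff.mpr h
    rw [List.count_cons_self, List.count_erase_self]
    push_cast [h1]
    omega
  · have hvc : ¬ ch = v := fun e => hv e.symm
    simp [hvc, List.count_erase_of_ne hv]

theorem pvChv_cons_not_mem (ch : Char) (rest pool : List Char) (h : ch ∉ pool) (v : Char) :
    pvChv (ch :: rest) pool v = pvChv rest pool v + (if v = ch then 1 else 0) := by
  unfold pvChv
  by_cases hv : v = ch
  · subst hv
    have h0 : pool.count v = 0 := List.count_eq_zero.mpr h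
    rw [List.count_cons_self, h0]
    simp
    omega
  · have hvc : ¬ ch = v := fun e => hv e.symm
    simp [hvc, hv]

-- terms outside the support vanish
theorem pvChv_zero_of_not_mem (l1 l2 : List Char) (v : Char) (h : v ∉ l1) :
    pvChv l1 l2 v = 0 := by
  unfold pvChv
  rw [List.count_eq_zero.mpr h]
  simp

-- loop invariant: the greedy loop computes the total surplus
theorem pvGoB_eq (l1 : List Char) : ∀ (pool : List Char) (m : Int),
    pvGoB l1 pool m = m + ∑ v ∈ l1.toFinset, pvChv l1 pool v := by
  induction l1 with
  | nil => intro pool m; simp [pvGoB]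
  | cons ch rest ih =>
    intro pool m
    by_cases h : ch ∈ pool
    · rw [show pvGoB (ch :: rest) pool m = pvGoB rest (pool.erase ch) m from by
        simp [pvGoB, h], ih]
      congr 1
      rw [List.toFinset_cons]
      by_cases hm : ch ∈ rest.toFinset
      · rw [Finset.insert_eq_self.mpr hm]
        exact (Finset.sum_congr rfl fun v _ => pvChv_cons_mem ch rest pool h v).symm
      · rw [Finset.sum_insert hm]
        rw [pvChv_cons_mem ch rest pool h ch,
          pvChv_zero_of_not_mem rest _ ch (by simpa using hm), zero_add]
        exact (Finset.sum_congr rfl fun v _ => pvChv_cons_mem ch rest pool h v).symm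
    · rw [show pvGoB (ch :: rest) pool m = pvGoB rest pool (m + 1) from by
        simp [pvGoB, h], ih]
      have hsum : ∑ v ∈ (ch :: rest).toFinset, pvChv (ch :: rest) pool v
          = (∑ v ∈ (ch :: rest).toFinset, pvChv rest pool v) + 1 := by
        rw [Finset.sum_congr rfl fun v _ => pvChv_cons_not_mem ch rest pool h v,
          Finset.sum_add_distrib]
        congr 1
        rw [Finset.sum_ite_eq' _ ch (fun _ => (1 : Int))]
        simp
      have hdrop : ∑ v ∈ (ch :: rest).toFinset, pvChv rest pool v
          = ∑ v ∈ rest.toFinset, pvChv rest pool v := by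
        rw [List.toFinset_cons]
        by_cases hm : ch ∈ rest.toFinset
        · rw [Finset.insert_eq_self.mpr hm]
        · rw [Finset.sum_insert hm, pvChv_zero_of_not_mem rest _ ch (by simpa using hm), zero_add]
      rw [hsum, hdrop]
      ring

-- A's fold equals the same total surplus
theorem changesA_eq (l1 l2 : List Char) :
    ((PySem.Dict.counter l1).items).foldl (fun acc p =>
        if p.2 > (PySem.Dict.counter l2).getD p.1 0 then
          acc + (p.2 - (PySem.Dict.counter l2).getD p.1 0) else acc) (0 : Int)
    = ∑ v ∈ l1.toFinset, pvChv l1 l2 v := by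
  rw [PySem.Dict.items_counter, List.foldl_map]
  have hfun : (fun (acc : Int) v =>
      if ((l1.count v : Int)) > (PySem.Dict.counter l2).getD v 0 then
        acc + ((l1.count v : Int) - (PySem.Dict.counter l2).getD v 0) else acc)
      = fun acc v => acc + pvChv l1 l2 v := by
    funext acc v
    rw [PySem.Dict.getD_counter]
    unfold pvChv
    by_cases h : ((l2.count v : Int)) < (l1.count v : Int)
    · rw [if_pos h, max_eq_left (by omega)]
    · rw [if_neg h, max_eq_right (by omega), add_zero]
  rw [hfun, PySem.List.foldl_add, zero_add,
    ← List.sum_toFinset _ (PySem.Set.nodup_ofList l1)]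
  congr 1
  ext v
  simp [PySem.Set.mem_ofList]

-- ===== VERDICT (by name: the statement is the Claim_ definition above) =====
theorem are_k_anagrams_spec : Claim_equal_are_k_anagrams := by
  intro s1 s2 k _
  unfold Spec_are_k_anagrams are_k_anagrams are_k_anagrams_alt
  by_cases h : PySem.Str.len s1 ≠ PySem.Str.len s2
  · rw [if_pos h, if_pos h]
  · rw [if_neg h, if_neg h]
    dsimp only
    rw [changesA_eq s1.toList s2.toList, pvGoB_eq s1.toList s2.toList 0, zero_add]
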